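-- pv_equiv track=rewrite | github.com/seniortasse/SudokuCompanionToolkit-v3 | python/publishing/pattern_library/pattern_enricher.py | _normalize_family_id
-- ===== SOURCE A (Python) =====
-- from typing import List, Optional
--
-- def _normalize_family_id(value: Optional[str], fallback_family_name: str) -> str:
--     raw = str(value or fallback_family_name).strip().lower()
--     out = []
--     prev_dash = False
--     for ch in raw:
--         if ch.isalnum():
--             out.append(ch)
--             prev_dash = False
--         else:
--             if not prev_dash:
--                 out.append("-")
--                 prev_dash = True
--     family_id = "".join(out).strip("-")
--     return family_id or "uncategorized"
-- ===== SOURCE B (Python) =====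
-- def _normalize_family_id(value, fallback_family_name):
--     raw = str(value or fallback_family_name).strip().lower()
--     masked = "".join(c if c.isalnum() else " " for c in raw)
--     return "-".join(masked.split()) or "uncategorized"
-- ===== Notes on version B (the rewrite author's own statement) =====
-- stated objective: simpler
-- what changed: Replaced A's single stateful loop (prev_dash sentinel, dash emission, trailing strip('-')) by two stock passes: map every non-alphanumeric character to a space, then whitespace-split into tokens and '-'.join them.
import Mathlib
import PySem

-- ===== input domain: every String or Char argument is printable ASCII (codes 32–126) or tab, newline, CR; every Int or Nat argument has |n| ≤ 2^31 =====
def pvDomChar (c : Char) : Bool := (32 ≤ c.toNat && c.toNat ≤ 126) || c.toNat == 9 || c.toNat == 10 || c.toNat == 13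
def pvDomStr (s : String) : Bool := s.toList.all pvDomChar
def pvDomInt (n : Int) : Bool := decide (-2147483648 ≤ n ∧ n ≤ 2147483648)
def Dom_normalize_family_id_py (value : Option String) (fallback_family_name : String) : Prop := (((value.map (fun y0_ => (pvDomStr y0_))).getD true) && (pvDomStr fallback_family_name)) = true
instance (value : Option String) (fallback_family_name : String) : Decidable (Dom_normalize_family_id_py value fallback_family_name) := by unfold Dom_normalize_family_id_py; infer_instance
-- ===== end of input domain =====

-- B replaces A's stateful dash-emitting loop (prev_dash flag + trailing strip('-'))
-- by two stock passes: mask every non-alphanumeric char to a space, then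
-- whitespace-split and '-'.join — objective: simpler.

-- ===== PORT A =====
-- the for-loop of A: state (out, prev_dash)
def aFold : List Char → List Char → Bool → List Char
  | [], out, _ => out
  | ch :: rest, out, prev_dash =>
    if PySem.Chars.isalnum ch then aFold rest (out ++ [ch]) false
    else if prev_dash then aFold rest out prev_dash
    else aFold rest (out ++ ['-']) true

def normalize_family_id_py (value : Option String) (fallback_family_name : String) : String :=
  let base : String := match value with
    | some v => if v = "" then fallback_family_name else v
    | none => fallback_family_name
  let raw := PySem.Str.lower (PySem.Str.strip base)
  let out := aFold raw.toList [] false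
  let family_id := PySem.Chars.stripChars out ['-']
  if family_id = [] then "uncategorized" else String.ofList family_id

-- ===== PORT B =====
-- B, pass 1: ch if ch.isalnum() else ' '
def bMask (c : Char) : Char := if PySem.Chars.isalnum c then c else ' '

def normalize_family_id_py_alt (value : Option String) (fallback_family_name : String) : String :=
  let base : String := match value with
    | some v => if v = "" then fallback_family_name else v
    | none => fallback_family_name
  let raw := PySem.Str.lower (PySem.Str.strip base)
  let masked := raw.toList.map bMask
  let joined := PySem.Chars.join ['-'] (PySem.Chars.split₀ masked)
  if joined = [] then "uncategorized" else String.ofList joined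

-- ===== PRECONDITION & SPEC =====
def Spec_normalize_family_id_py (value : Option String) (fallback_family_name : String) (out : String) : Prop := out = normalize_family_id_py_alt value fallback_family_name
instance (value : Option String) (fallback_family_name : String) (out : String) : Decidable (Spec_normalize_family_id_py value fallback_family_name out) := by unfold Spec_normalize_family_id_py; infer_instance

-- ===== CLAIM (what is proved, stated in full; the proofs are below) =====
def Claim_equal_normalize_family_id_py : Prop := ∀ (value : Option String) (fallback_family_name : String), Dom_normalize_family_id_py value fallback_family_name → Spec_normalize_family_id_py value fallback_family_name (normalize_family_id_py value fallback_family_name)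

-- ===== LEMMAS AND PROOFS =====

-- proof-side intermediate: the tokens (maximal alnum runs) both programs produce
def bFold : List Char → List (List Char) → List Char → List (List Char)
  | [], tokens, cur => if cur = [] then tokens else tokens ++ [cur]
  | ch :: rest, tokens, cur =>
    if PySem.Chars.isalnum ch then bFold rest tokens (cur ++ [ch])
    else if cur = [] then bFold rest tokens cur
    else bFold rest (tokens ++ [cur]) []

-- right-strip of dashes, the piece of stripChars the induction tracks
def rstripD (xs : List Char) : List Char :=
  (List.dropWhile (fun c => (['-'] : List Char).contains c) xs.reverse).reverse

theorem alnum_ne_dash {c : Char} (h : PySem.Chars.isalnum c = true) : c ≠ '-' := by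
  intro e; subst e; exact absurd h (by decide)

theorem alnum_not_space (c : Char) (h : PySem.Chars.isalnum c = true) : PySem.Chars.isspace c = false := by
  simp [PySem.Chars.isalnum, PySem.Chars.isalpha, PySem.Chars.isdigit, PySem.Chars.isupper, PySem.Chars.islower] at h
  have hn : (65 ≤ c.toNat ∧ c.toNat ≤ 90) ∨ (97 ≤ c.toNat ∧ c.toNat ≤ 122) ∨ (48 ≤ c.toNat ∧ c.toNat ≤ 57) := by
    rcases h with (⟨h1,h2⟩|⟨h1,h2⟩)|⟨h1,h2⟩
    · exact Or.inl ⟨Nat.succ_le_of_lt (by exact_mod_cast h1), by exact_mod_cast h2⟩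
    · exact Or.inr (Or.inl ⟨by exact_mod_cast h1, by exact_mod_cast h2⟩)
    · exact Or.inr (Or.inr ⟨by exact_mod_cast h1, by exact_mod_cast h2⟩)
  simp only [PySem.Chars.isspace]
  simp only [Bool.or_eq_false_iff, Bool.and_eq_false_iff, decide_eq_false_iff_not]
  omega

theorem aFold_out (s : List Char) : ∀ (out : List Char) (p : Bool),
    aFold s out p = out ++ aFold s [] p := by
  induction s with
  | nil => intro out p; simp [aFold]
  | cons c rest ih =>
    intro out p
    by_cases h : PySem.Chars.isalnum c = true
    · simp only [aFold, h, if_true, List.nil_append]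
      rw [ih (out ++ [c]) false, ih [c] false]; simp
    · have h' : PySem.Chars.isalnum c = false := eq_false_of_ne_true h
      cases p with
      | true =>
        simp only [aFold, h', Bool.false_eq_true, if_false, if_true]
        exact ih out true
      | false =>
        simp only [aFold, h', Bool.false_eq_true, if_false, List.nil_append]
        rw [ih (out ++ ['-']) true, ih ['-'] true]; simp

theorem bFold_toks (s : List Char) : ∀ (toks : List (List Char)) (cur : List Char),
    bFold s toks cur = toks ++ bFold s [] cur := by
  induction s with
  | nil =>
    intro toks cur
    by_cases h : cur = []
    · simp [bFold, h]
    · simp [bFold, h]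
  | cons c rest ih =>
    intro toks cur
    by_cases h : PySem.Chars.isalnum c = true
    · simp only [bFold, h, if_true]
      rw [ih toks (cur ++ [c]), ih [] (cur ++ [c])]
    · have h' : PySem.Chars.isalnum c = false := eq_false_of_ne_true h
      by_cases hc : cur = []
      · simp only [bFold, h', Bool.false_eq_true, if_false, hc, if_true]
        exact ih toks []
      · simp only [bFold, h', Bool.false_eq_true, if_false, hc, List.nil_append]
        rw [ih (toks ++ [cur]) [], ih [cur] []]; simp

-- B's two passes compute exactly the maximal-alnum-run tokens
theorem go_sim (s : List Char) : ∀ (cur : List Char) (acc : List (List Char)),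
    PySem.Chars.split₀.go (s.map bMask) cur acc = acc.reverse ++ bFold s [] cur.reverse := by
  induction s with
  | nil =>
    intro cur acc
    by_cases h : cur = []
    · simp [PySem.Chars.split₀.go, bFold, h]
    · have : cur.isEmpty = false := by simpa [List.isEmpty_iff] using h
      have hr : cur.reverse ≠ [] := by simpa using h
      simp [PySem.Chars.split₀.go, bFold, this, hr]
  | cons c rest ih =>
    intro cur acc
    by_cases h : PySem.Chars.isalnum c = true
    · have hm : bMask c = c := by simp [bMask, h]
      have hs : PySem.Chars.isspace c = false := alnum_not_space c h
      simp only [List.map_cons, PySem.Chars.split₀.go, hm, hs, Bool.false_eq_true, if_false]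
      rw [ih (c :: cur) acc]
      simp [bFold, h]
    · have h' : PySem.Chars.isalnum c = false := eq_false_of_ne_true h
      have hm : bMask c = ' ' := by simp [bMask, h']
      simp only [List.map_cons, PySem.Chars.split₀.go, hm]
      have hsp : PySem.Chars.isspace ' ' = true := by decide
      by_cases hc : cur = []
      · have : cur.isEmpty = true := by simpa [List.isEmpty_iff] using hc
        simp only [hsp, if_true, this]
        rw [ih [] acc]
        simp [bFold, h', hc]
      · have he : cur.isEmpty = false := by simpa [List.isEmpty_iff] using hc
        have hr : cur.reverse ≠ [] := by simpa using hc
        simp only [hsp, if_true, he, Bool.false_eq_true, if_false]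
        rw [ih [] (cur.reverse :: acc)]
        simp only [bFold, h', Bool.false_eq_true, if_false, hr, List.reverse_cons,
          List.reverse_nil, List.nil_append]
        rw [bFold_toks rest [cur.reverse] []]
        simp

theorem splitMask_eq_bFold (s : List Char) :
    PySem.Chars.split₀ (s.map bMask) = bFold s [] [] := by
  unfold PySem.Chars.split₀
  simpa using go_sim s [] []

theorem bFold_ne_nil (s : List Char) : ∀ (toks : List (List Char)) (cur : List Char),
    (∀ t ∈ toks, t ≠ []) → ∀ t ∈ bFold s toks cur, t ≠ [] := by
  induction s with
  | nil =>
    intro toks cur htoks t ht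
    by_cases hc : cur = []
    · simp only [bFold, hc, if_true] at ht; exact htoks t ht
    · simp only [bFold, hc, if_false] at ht
      rcases List.mem_append.mp ht with h | h
      · exact htoks t h
      · simp at h; subst h; exact hc
  | cons c rest ih =>
    intro toks cur htoks t ht
    by_cases h : PySem.Chars.isalnum c = true
    · simp only [bFold, h, if_true] at ht
      exact ih toks (cur ++ [c]) htoks t ht
    · have h' : PySem.Chars.isalnum c = false := eq_false_of_ne_true h
      by_cases hc : cur = []
      · simp only [bFold, h', Bool.false_eq_true, if_false, hc, if_true] at ht
        exact ih toks [] htoks t ht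
      · simp only [bFold, h', Bool.false_eq_true, if_false, hc] at ht
        refine ih (toks ++ [cur]) [] ?_ t ht
        intro u hu
        rcases List.mem_append.mp hu with h2 | h2
        · exact htoks u h2
        · simp at h2; subst h2; exact hc

theorem join_ne_nil (ts : List (List Char)) (hne : ts ≠ [])
    (h : ∀ t ∈ ts, t ≠ []) : PySem.Chars.join ['-'] ts ≠ [] := by
  match ts with
  | [] => exact absurd rfl hne
  | [t] =>
    rw [PySem.Chars.join_singleton]; exact h t (by simp)
  | t :: u :: rest =>
    rw [PySem.Chars.join_cons_cons]
    have : t ≠ [] := h t (by simp)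
    simp [this]

theorem rstripD_cons_not_dash {c : Char} (h : c ≠ '-')
    (xs : List Char) : rstripD (c :: xs) = c :: rstripD xs := by
  unfold rstripD
  rw [show (c :: xs).reverse = xs.reverse ++ [c] from by simp, List.dropWhile_append]
  by_cases he : (List.dropWhile (fun c => (['-'] : List Char).contains c) xs.reverse).isEmpty = true
  · rw [if_pos he]
    rw [List.isEmpty_iff] at he
    rw [he]
    simp [h]
  · rw [if_neg he]; simp

theorem rstripD_cons_dash (xs : List Char) :
    rstripD ('-' :: xs) = if rstripD xs = [] then [] else '-' :: rstripD xs := by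
  unfold rstripD
  rw [show ('-' :: xs).reverse = xs.reverse ++ ['-'] from by simp, List.dropWhile_append]
  by_cases he : (List.dropWhile (fun c => (['-'] : List Char).contains c) xs.reverse).isEmpty = true
  · rw [if_pos he]
    rw [List.isEmpty_iff] at he
    rw [he]
    simp
  · rw [if_neg he]
    have hne : List.dropWhile (fun c => (['-'] : List Char).contains c) xs.reverse ≠ [] := by
      simpa using he
    rw [if_neg (by simpa using hne)]
    simp

-- the output of A's loop in state prev_dash = true never starts with a dash
theorem aFold_true_no_lead (s : List Char) :
    List.dropWhile (fun c => (['-'] : List Char).contains c) (aFold s [] true)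
      = aFold s [] true := by
  induction s with
  | nil => simp [aFold]
  | cons c rest ih =>
    by_cases h : PySem.Chars.isalnum c = true
    · simp only [aFold, h, if_true, List.nil_append]
      rw [aFold_out rest [c] false]
      simp only [List.singleton_append]
      rw [List.dropWhile_cons_of_neg (by simp; exact alnum_ne_dash h)]
    · have h' : PySem.Chars.isalnum c = false := eq_false_of_ne_true h
      simpa [aFold, h'] using ih

-- the central simulation: the tokens joined = A's loop output right-stripped
theorem central (s : List Char) :
    (PySem.Chars.join ['-'] (bFold s [] []) = rstripD (aFold s [] true)) ∧
    (∀ cur, cur ≠ [] →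
      PySem.Chars.join ['-'] (bFold s [] cur) = cur ++ rstripD (aFold s [] false)) := by
  induction s with
  | nil =>
    constructor
    · simp [bFold, aFold, PySem.Chars.join_nil, rstripD]
    · intro cur hc
      simp [bFold, aFold, hc, PySem.Chars.join_singleton, rstripD]
  | cons c rest ih =>
    obtain ⟨ih2, ih1⟩ := ih
    by_cases h : PySem.Chars.isalnum c = true
    · constructor
      · simp only [bFold, aFold, h, if_true, List.nil_append]
        rw [ih1 [c] (by simp), aFold_out rest [c] false]
        simp only [List.singleton_append]
        rw [rstripD_cons_not_dash (alnum_ne_dash h)]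
      · intro cur hc
        simp only [bFold, aFold, h, if_true, List.nil_append]
        rw [ih1 (cur ++ [c]) (by simp), aFold_out rest [c] false]
        simp only [List.singleton_append]
        rw [rstripD_cons_not_dash (alnum_ne_dash h)]
        simp
    · have h' : PySem.Chars.isalnum c = false := eq_false_of_ne_true h
      constructor
      · simp only [bFold, aFold, h', Bool.false_eq_true, if_false, if_true]
        exact ih2
      · intro cur hc
        simp only [bFold, aFold, h', Bool.false_eq_true, if_false, hc, List.nil_append]
        rw [bFold_toks rest [cur] [], aFold_out rest ['-'] true]
        simp only [List.singleton_append]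
        rw [rstripD_cons_dash]
        by_cases hb : bFold rest [] [] = []
        · rw [hb]
          rw [hb, PySem.Chars.join_nil] at ih2
          rw [if_pos ih2.symm]
          simp [PySem.Chars.join_singleton]
        · have htok : ∀ t ∈ bFold rest [] [], t ≠ [] := bFold_ne_nil rest [] [] (by simp)
          have hjoin := join_ne_nil _ hb htok
          have hr : rstripD (aFold rest [] true) ≠ [] := ih2 ▸ hjoin
          rw [if_neg hr]
          rcases List.exists_cons_of_ne_nil hb with ⟨t, ts, hbe⟩
          rw [hbe]
          rw [hbe] at ih2
          rw [show cur :: t :: ts = (cur :: t :: ts) from rfl]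
          rw [PySem.Chars.join_cons_cons, ih2]
          simp

theorem main_list (s : List Char) :
    PySem.Chars.stripChars (aFold s [] false) ['-'] =
      PySem.Chars.join ['-'] (PySem.Chars.split₀ (s.map bMask)) := by
  rw [splitMask_eq_bFold]
  have hstrip : ∀ xs : List Char, PySem.Chars.stripChars xs ['-'] =
      rstripD (List.dropWhile (fun c => (['-'] : List Char).contains c) xs) := by
    intro xs; rfl
  cases s with
  | nil => simp [aFold, bFold, PySem.Chars.stripChars, PySem.Chars.join_nil]
  | cons c rest =>
    by_cases h : PySem.Chars.isalnum c = true
    · simp only [aFold, bFold, h, if_true, List.nil_append]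
      rw [aFold_out rest [c] false, hstrip]
      simp only [List.singleton_append]
      rw [List.dropWhile_cons_of_neg (by simp; exact alnum_ne_dash h),
          rstripD_cons_not_dash (alnum_ne_dash h)]
      exact ((central rest).2 [c] (by simp)).symm
    · have h' : PySem.Chars.isalnum c = false := eq_false_of_ne_true h
      simp only [aFold, bFold, h', Bool.false_eq_true, if_false, if_true, List.nil_append]
      rw [aFold_out rest ['-'] true, hstrip]
      simp only [List.singleton_append]
      rw [List.dropWhile_cons_of_pos (by simp), aFold_true_no_lead]
      exact ((central rest).1).symm

-- ===== VERDICT (by name: the statement is the Claim_ definition above) =====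
theorem normalize_family_id_py_spec : Claim_equal_normalize_family_id_py := by
  intro value fallback_family_name _
  unfold Spec_normalize_family_id_py normalize_family_id_py normalize_family_id_py_alt
  simp only []
  rw [main_list]
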